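-- pv_equiv track=rewrite | github.com/EthanHaque/ACSL | Sameness Factor/sameness3.py | del_like
-- ===== SOURCE A (Python) =====
-- def del_like(s1, s2):
--     count= 0
--     while count < len(s1) and count < len(s2):
--         if s1[count] == s2[count]:
--             s1, s2 = s1[:count] + s1[count+1:], s2[:count] + s2[count+1:]
--         else:
--             count += 1
--     return [s1, s2]
-- ===== SOURCE B (Python) =====
-- def del_like(s1, s2):
--     m = min(len(s1), len(s2))
--     pairs = [(a, b) for a, b in zip(s1, s2) if a != b]
--     return [''.join(a for a, _ in pairs) + s1[m:],
--             ''.join(b for _, b in pairs) + s2[m:]]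
-- ===== Notes on version B (the rewrite author's own statement) =====
-- stated objective: faster
-- what changed: Replaces A's while-loop that repeatedly deletes the matching character from both strings via slicing-and-rescanning with a single zip pass that keeps the differing aligned pairs and appends the longer string's tail.
import Mathlib
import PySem

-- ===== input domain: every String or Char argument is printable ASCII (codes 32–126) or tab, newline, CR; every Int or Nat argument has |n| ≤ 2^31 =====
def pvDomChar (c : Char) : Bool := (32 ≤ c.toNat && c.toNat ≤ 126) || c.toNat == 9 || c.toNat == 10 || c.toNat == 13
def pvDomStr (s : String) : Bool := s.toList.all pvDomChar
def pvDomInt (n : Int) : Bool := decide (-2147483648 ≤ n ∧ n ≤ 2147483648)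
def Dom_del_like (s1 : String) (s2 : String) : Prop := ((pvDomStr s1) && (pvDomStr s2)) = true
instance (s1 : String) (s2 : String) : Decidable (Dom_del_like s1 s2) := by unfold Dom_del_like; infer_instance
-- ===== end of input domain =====

-- B replaces A's quadratic delete-and-rescan while-loop by a single pass that keeps the
-- differing aligned pairs and appends the longer string's tail (objective: faster).

-- ===== PORT A =====
-- A's while-loop: count and both strings are the mutable state; s[:count] + s[count+1:]
-- (both bounds nonnegative, count < len) is exactly take count ++ drop (count+1).
-- The fuel is only a totality guard: min(len s1, len s2) - count strictly decreases each
-- iteration, so the initial fuel min(len s1, len s2) is never exhausted (proved below).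
def delLoop (fuel : Nat) (count : Nat) (l1 l2 : List Char) : List Char × List Char :=
  match fuel with
  | 0 => (l1, l2)
  | fuel + 1 =>
    if h : count < l1.length ∧ count < l2.length then
      if l1[count]'h.1 = l2[count]'h.2 then
        delLoop fuel count (l1.take count ++ l1.drop (count + 1))
                           (l2.take count ++ l2.drop (count + 1))
      else
        delLoop fuel (count + 1) l1 l2
    else (l1, l2)

def del_like (s1 : String) (s2 : String) : List String :=
  let r := delLoop (min s1.toList.length s2.toList.length) 0 s1.toList s2.toList
  [String.ofList r.1, String.ofList r.2]

-- ===== PORT B =====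
-- Source B: pairs = [(a,b) for a,b in zip(s1,s2) if a != b]; join firsts/seconds; append s[m:] (m ≥ 0, so drop m).
def del_like_alt (s1 : String) (s2 : String) : List String :=
  let l1 := s1.toList
  let l2 := s2.toList
  let m := min l1.length l2.length
  let pairs := (l1.zip l2).filter (fun p => p.1 != p.2)
  [String.ofList (pairs.map Prod.fst ++ l1.drop m),
   String.ofList (pairs.map Prod.snd ++ l2.drop m)]

-- ===== PRECONDITION & SPEC =====
def Spec_del_like (s1 : String) (s2 : String) (out : List String) : Prop := out = del_like_alt s1 s2
instance (s1 : String) (s2 : String) (out : List String) : Decidable (Spec_del_like s1 s2 out) := by unfold Spec_del_like; infer_instance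

-- ===== CLAIM (what is proved, stated in full; the proofs are below) =====
def Claim_equal_del_like : Prop := ∀ (s1 : String) (s2 : String), Dom_del_like s1 s2 → Spec_del_like s1 s2 (del_like s1 s2)

-- ===== LEMMAS AND PROOFS =====

-- The loop, entered with the already-scanned prefixes a, b of equal length and the
-- unscanned suffixes d, e, and enough fuel for the remaining iterations, returns the
-- prefixes followed by the differing aligned pairs of the suffixes and the tail beyond
-- the shorter suffix.
lemma delLoop_spec (d : List Char) : ∀ (fuel : Nat) (e a b : List Char),
    a.length = b.length → min d.length e.length ≤ fuel →
    delLoop fuel a.length (a ++ d) (b ++ e) =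
      (a ++ (((d.zip e).filter (fun p => p.1 != p.2)).map Prod.fst ++ d.drop (min d.length e.length)),
       b ++ (((d.zip e).filter (fun p => p.1 != p.2)).map Prod.snd ++ e.drop (min d.length e.length))) := by
  induction d with
  | nil =>
    intro fuel e a b hab _
    cases fuel with
    | zero => rw [delLoop]; simp
    | succ fuel => rw [delLoop]; simp
  | cons c d' ih =>
    intro fuel e a b hab hfuel
    cases e with
    | nil =>
      cases fuel with
      | zero => rw [delLoop]; simp
      | succ fuel => rw [delLoop]; simp [hab]
    | cons c' e' =>
      cases fuel with
      | zero => simp at hfuel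
      | succ fuel =>
        rw [delLoop]
        have h1 : a.length < (a ++ c :: d').length := by simp
        have h2 : a.length < (b ++ c' :: e').length := by simp [← hab]
        rw [dif_pos ⟨h1, h2⟩]
        have g1 : (a ++ c :: d')[a.length]'h1 = c := by simp
        have g2 : (b ++ c' :: e')[a.length]'h2 = c' := by
          rw [List.getElem_append_right (by omega)]
          simp [hab]
        rw [g1, g2]
        have hfuel' : min d'.length e'.length ≤ fuel := by
          simp [Nat.succ_min_succ] at hfuel; omega
        by_cases hc : c = c'
        · rw [if_pos hc]
          have t1 : (a ++ c :: d').take a.length = a := by simp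
          have t2 : (b ++ c' :: e').take a.length = b := by rw [hab]; simp
          have u1 : (a ++ c :: d').drop (a.length + 1) = d' := by
            have : a ++ c :: d' = (a ++ [c]) ++ d' := by simp
            rw [this]
            have : a.length + 1 = (a ++ [c]).length := by simp
            rw [this, List.drop_left]
          have u2 : (b ++ c' :: e').drop (a.length + 1) = e' := by
            have : b ++ c' :: e' = (b ++ [c']) ++ e' := by simp
            rw [this, hab]
            have : b.length + 1 = (b ++ [c']).length := by simp
            rw [this, List.drop_left]
          rw [t1, t2, u1, u2, ih fuel e' a b hab hfuel']
          subst hc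
          simp [Nat.succ_min_succ]
        · rw [if_neg hc]
          have e1 : a ++ c :: d' = (a ++ [c]) ++ d' := by simp
          have e2 : b ++ c' :: e' = (b ++ [c']) ++ e' := by simp
          have e3 : a.length + 1 = (a ++ [c]).length := by simp
          rw [e1, e2, e3, ih fuel e' (a ++ [c]) (b ++ [c']) (by simp [hab]) hfuel']
          have hb : (c != c') = true := by simpa using hc
          simp [hb, Nat.succ_min_succ]

-- ===== VERDICT (by name: the statement is the Claim_ definition above) =====
theorem del_like_spec : Claim_equal_del_like := by
  intro s1 s2 _
  unfold Spec_del_like del_like del_like_alt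
  have h := delLoop_spec s1.toList (min s1.toList.length s2.toList.length) s2.toList [] [] rfl (le_refl _)
  simp only [List.nil_append, List.length_nil] at h
  rw [h]
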